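-- pv_equiv track=rewrite | github.com/AutoVerse-ai/Verse-library | pythonparser.py | parseGuardCode
-- ===== SOURCE A (Python) =====
-- def parseGuardCode(code):
--     #TODO: should be more general and handle or
--     parts = code.split("and")
--     out = code
--     if len(parts) > 1:
--         left = parseGuardCode(parts[0])
--         right = parseGuardCode(parts[1])
--         out = "And(" + left + "," + right + ")"
--     return out
-- ===== SOURCE B (Python) =====
-- def parseGuardCode(code):
--     parts = code.split("and")
--     if len(parts) > 1:
--         return "And(" + parts[0] + "," + parts[1] + ")"
--     return code
-- ===== Notes on version B (the rewrite author's own statement) =====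
-- stated objective: simpler
-- what changed: Replaces A's self-recursion on the first two split parts with a single non-recursive split-and-format: the parts of a split never contain the separator, so A's recursive calls are identity and can be dropped.
import Mathlib
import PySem

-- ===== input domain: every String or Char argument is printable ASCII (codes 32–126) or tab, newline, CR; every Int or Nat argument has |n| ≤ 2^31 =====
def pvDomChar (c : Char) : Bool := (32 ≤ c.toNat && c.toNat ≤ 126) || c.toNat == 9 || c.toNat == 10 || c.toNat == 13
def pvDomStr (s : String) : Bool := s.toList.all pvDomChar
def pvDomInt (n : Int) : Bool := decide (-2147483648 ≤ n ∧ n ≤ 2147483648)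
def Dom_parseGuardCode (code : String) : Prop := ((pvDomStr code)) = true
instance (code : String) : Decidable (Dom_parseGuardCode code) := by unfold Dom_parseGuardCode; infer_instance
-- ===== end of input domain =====

-- B drops A's degenerate recursion (the parts of a split never contain the separator "and", so
-- A's recursive calls return their argument unchanged) and formats the two parts directly: simpler.

-- ===== PORT A =====
def pvSepAnd : List Char := ['a', 'n', 'd']

-- A's recursion, transliterated; the fuel (length + 1) only makes it total and is never exhausted.
def parseGuardCodeGo : Nat → List Char → List Char
  | 0, cs => cs
  | fuel + 1, cs =>
    let parts := PySem.Chars.splitOn cs pvSepAnd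
    if 1 < parts.length then
      let left := parseGuardCodeGo fuel (parts.getD 0 [])
      let right := parseGuardCodeGo fuel (parts.getD 1 [])
      ('A' :: 'n' :: 'd' :: '(' :: left) ++ (',' :: right) ++ [')']
    else cs

def parseGuardCode (code : String) : String :=
  String.ofList (parseGuardCodeGo (code.toList.length + 1) code.toList)

-- ===== PORT B =====
def parseGuardCode_alt (code : String) : String :=
  let parts := PySem.Chars.splitOn code.toList pvSepAnd
  if 1 < parts.length then
    String.ofList (('A' :: 'n' :: 'd' :: '(' :: parts.getD 0 []) ++ (',' :: parts.getD 1 []) ++ [')'])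
  else code

-- ===== PRECONDITION & SPEC =====
def Spec_parseGuardCode (code : String) (out : String) : Prop := out = parseGuardCode_alt code
instance (code : String) (out : String) : Decidable (Spec_parseGuardCode code out) := by unfold Spec_parseGuardCode; infer_instance

-- ===== CLAIM (what is proved, stated in full; the proofs are below) =====
def Claim_equal_parseGuardCode : Prop := ∀ (code : String), Dom_parseGuardCode code → Spec_parseGuardCode code (parseGuardCode code)

-- ===== LEMMAS AND PROOFS =====

-- If sep never occurs in (cur.reverse ++ l), splitOn.go emits it as a single final piece.
theorem pv_go_no_sep (sep : List Char) (fuel : Nat) :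
    ∀ (l cur : List Char) (acc : List (List Char)),
      ¬ sep <:+: (cur.reverse ++ l) →
      PySem.Chars.splitOn.go sep fuel l cur acc = ((cur.reverse ++ l) :: acc).reverse := by
  induction fuel with
  | zero => intro l cur acc h; rfl
  | succ fuel ih =>
    intro l cur acc h
    cases l with
    | nil => simp [PySem.Chars.splitOn.go]
    | cons c rest =>
      rw [PySem.Chars.splitOn.go]
      have hpre : sep.isPrefixOf (c :: rest) = false := by
        by_contra hx
        have : sep <+: (c :: rest) := List.isPrefixOf_iff_prefix.mp (by
          cases hb : sep.isPrefixOf (c :: rest) <;> simp_all)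
        obtain ⟨t, ht⟩ := this
        exact h ⟨cur.reverse, t, by simp [← ht]⟩
      rw [if_neg (by simp [hpre])]
      have := ih rest (c :: cur) acc (by simpa using h)
      simpa using this

-- No sep in cs ⇒ splitOn cs sep = [cs].
theorem pv_splitOn_no_sep (sep cs : List Char) (h : ¬ sep <:+: cs) :
    PySem.Chars.splitOn cs sep = [cs] := by
  unfold PySem.Chars.splitOn
  rw [pv_go_no_sep sep _ cs [] [] (by simpa using h)]
  simp

-- Invariant: no occurrence of sep starts inside cur (possibly running on into l).
def pvInv (sep l cur : List Char) : Prop :=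
  ∀ u, u <+: cur → u ≠ [] → ¬ sep <+: (u.reverse ++ l)

-- Every piece emitted by splitOn.go is sep-free.
theorem pv_go_parts_no_sep (sep : List Char) (hsep : sep ≠ []) (fuel : Nat) :
    ∀ (l cur : List Char) (acc : List (List Char)),
      l.length < fuel →
      pvInv sep l cur →
      (∀ p ∈ acc, ¬ sep <:+: p) →
      ∀ p ∈ PySem.Chars.splitOn.go sep fuel l cur acc, ¬ sep <:+: p := by
  have hseplen : 0 < sep.length := List.length_pos_iff.mpr hsep
  induction fuel with
  | zero => intro l cur acc h; omega
  | succ fuel ih =>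
    intro l cur acc hlen hinv hacc
    have hcur : ¬ sep <:+: cur.reverse := by
      intro hin
      obtain ⟨t, hpt, hst⟩ := List.infix_iff_prefix_suffix.mp hin
      have hu : t.reverse <+: cur := by
        rw [← List.reverse_suffix]; simpa using hst
      have hne : t.reverse ≠ [] := by
        intro hx
        have : t = [] := by simpa using congrArg List.reverse hx
        subst this; exact hsep (List.prefix_nil.mp hpt)
      exact hinv t.reverse hu hne (by simpa using hpt.trans (List.prefix_append t l))
    cases l with
    | nil =>
      intro p hp
      rw [PySem.Chars.splitOn.go] at hp
      simp at hp
      rcases hp with h1 | h2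
      · exact fun hx => hacc p h1 hx
      · subst h2; exact hcur
      omega
    | cons c rest =>
      rw [PySem.Chars.splitOn.go]
      by_cases hp : sep.isPrefixOf (c :: rest) = true
      · rw [if_pos hp]
        apply ih _ [] (cur.reverse :: acc) (by
            have hle := (List.isPrefixOf_iff_prefix.mp hp).length_le
            simp at hle hlen ⊢; omega)
          (fun u hu hne => absurd (List.prefix_nil.mp hu) hne)
        intro p hpm
        rcases List.mem_cons.mp hpm with h1 | h2
        · subst h1; exact hcur
        · exact hacc p h2
      · rw [if_neg hp]
        apply ih rest (c :: cur) acc (by simp at hlen ⊢; omega) _ hacc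
        intro u hu hne
        cases u with
        | nil => exact absurd rfl hne
        | cons a u' =>
          obtain ⟨ha, hu'⟩ := List.cons_prefix_cons.mp hu
          subst ha
          cases hu'' : u' with
          | nil =>
            simpa [hu''] using fun hx => hp (List.isPrefixOf_iff_prefix.mpr hx)
          | cons b u3 =>
            rw [← hu'']
            have := hinv u' hu' (by simp [hu''])
            simpa using this

theorem pv_splitOn_parts_no_sep (sep cs : List Char) (hsep : sep ≠ []) :
    ∀ p ∈ PySem.Chars.splitOn cs sep, ¬ sep <:+: p := by
  unfold PySem.Chars.splitOn
  exact pv_go_parts_no_sep sep hsep _ cs [] [] (by omega)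
    (fun u hu hne => absurd (List.prefix_nil.mp hu) hne) (by simp)

-- On a sep-free argument, A's recursion returns it unchanged (any fuel).
theorem pv_go_fixed (fuel : Nat) (p : List Char) (h : ¬ pvSepAnd <:+: p) :
    parseGuardCodeGo fuel p = p := by
  cases fuel with
  | zero => rfl
  | succ f =>
    rw [parseGuardCodeGo]
    simp [pv_splitOn_no_sep pvSepAnd p h]

-- ===== VERDICT (by name: the statement is the Claim_ definition above) =====
theorem parseGuardCode_spec : Claim_equal_parseGuardCode := by
  intro code _
  unfold Spec_parseGuardCode parseGuardCode parseGuardCode_alt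
  rw [parseGuardCodeGo]
  by_cases hlen : 1 < (PySem.Chars.splitOn code.toList pvSepAnd).length
  · simp only [if_pos hlen]
    have h0 : (PySem.Chars.splitOn code.toList pvSepAnd).getD 0 [] ∈
        PySem.Chars.splitOn code.toList pvSepAnd := by
      rw [List.getD_eq_getElem _ _ (by omega)]; exact List.getElem_mem _
    have h1 : (PySem.Chars.splitOn code.toList pvSepAnd).getD 1 [] ∈
        PySem.Chars.splitOn code.toList pvSepAnd := by
      rw [List.getD_eq_getElem _ _ (by omega)]; exact List.getElem_mem _
    rw [pv_go_fixed _ _ (pv_splitOn_parts_no_sep pvSepAnd code.toList (by decide) _ h0),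
        pv_go_fixed _ _ (pv_splitOn_parts_no_sep pvSepAnd code.toList (by decide) _ h1)]
  · simp only [if_neg hlen]
    exact String.ofList_toList
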